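-- pv_equiv track=rewrite | github.com/BartvanWoesik/Reinforced-Learning | untitled8.py | norm_fun
-- ===== SOURCE A (Python) =====
-- def norm_fun(x):
--
--     high    = x[0]
--     low     = x[0]
--     new_x = []
--
--     for n in range(0, len(x)):
--         if ( x[n] > high):
--             high = x[n]
--         if ( x[n] < low):
--             low = x[n]
--
--     for n in range(0, len(x)):
--         new_x.append((x[n] -low) - (high - low))
--
--     return new_x
-- ===== SOURCE B (Python) =====
-- def norm_fun(x):
--     # single online pass: keep output normalized by the running max; when a new
--     # max appears, re-shift everything emitted so far by the increase
--     m = x[0]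
--     out = []
--     for v in x:
--         if v > m:
--             d = v - m
--             out = [o - d for o in out]
--             m = v
--         out.append(v - m)
--     return out
-- ===== Notes on version B (the rewrite author's own statement) =====
-- stated objective: alternative
-- what changed: B is a single online pass: instead of precomputing min/max and then mapping (v-low)-(high-low), it keeps the output normalized by the running maximum and re-shifts the already-emitted entries whenever a new maximum appears (the min is never tracked, since (v-low)-(high-low)=v-high).
import Mathlib
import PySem

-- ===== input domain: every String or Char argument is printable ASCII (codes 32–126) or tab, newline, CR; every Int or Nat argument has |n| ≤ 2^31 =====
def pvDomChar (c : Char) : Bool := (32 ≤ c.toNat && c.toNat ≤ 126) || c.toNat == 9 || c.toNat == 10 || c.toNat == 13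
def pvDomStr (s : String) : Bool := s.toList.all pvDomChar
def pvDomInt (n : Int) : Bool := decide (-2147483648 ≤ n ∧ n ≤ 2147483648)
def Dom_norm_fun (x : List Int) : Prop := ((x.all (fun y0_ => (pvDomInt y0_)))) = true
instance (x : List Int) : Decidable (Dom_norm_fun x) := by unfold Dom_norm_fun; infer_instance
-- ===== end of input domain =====

-- B: a single online pass that keeps the output normalized by the running max and re-shifts past entries when the max grows (min tracking dropped, since (v-low)-(high-low)=v-high); objective: alternative decomposition.


-- ===== PORT A =====
def norm_fun (x : List Int) : List Int :=
  match PySem.List.pyGet? x 0 with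
  | none => []   -- x[0] raises IndexError on empty x; excluded by Pre_
  | some h0 =>
    let hl := (PySem.List.pyRange 0 x.length 1).foldl
      (fun (p : Int × Int) n =>
        let v := PySem.List.pyGetD x n 0
        let p := if v > p.1 then (v, p.2) else p
        if v < p.2 then (p.1, v) else p) (h0, h0)
    (PySem.List.pyRange 0 x.length 1).foldl
      (fun acc n => acc ++ [(PySem.List.pyGetD x n 0 - hl.2) - (hl.1 - hl.2)]) []

-- ===== PORT B =====
def norm_fun_alt (x : List Int) : List Int :=
  match x with
  | [] => []   -- x[0] raises IndexError on empty x; excluded by Pre_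
  | h :: _ =>
    (x.foldl (fun (p : Int × List Int) v =>
        if v > p.1 then (v, p.2.map (fun o => o - (v - p.1)) ++ [v - v])
        else (p.1, p.2 ++ [v - p.1])) (h, [])).2

-- ===== PRECONDITION & SPEC =====
-- Pre_ excludes only the empty list: both A and B raise IndexError there (x[0]).
def Pre_norm_fun (x : List Int) : Prop := x ≠ []
instance (x : List Int) : Decidable (Pre_norm_fun x) := by unfold Pre_norm_fun; infer_instance
def pvWitness_norm_fun : List Int := [3, -1, 7, 7]

def Spec_norm_fun (x : List Int) (out : List Int) : Prop := out = norm_fun_alt x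
instance (x : List Int) (out : List Int) : Decidable (Spec_norm_fun x out) := by unfold Spec_norm_fun; infer_instance

-- ===== CLAIM (what is proved, stated in full; the proofs are below) =====
def Claim_equal_norm_fun : Prop := ∀ (x : List Int), Dom_norm_fun x → Pre_norm_fun x → Spec_norm_fun x (norm_fun x)

-- ===== LEMMAS AND PROOFS =====

-- the state-update of A's first loop, named so the lemmas can speak about it
def pvF : Int × Int → Int → Int × Int :=
  fun (p : Int × Int) v =>
    let p := if v > p.1 then (v, p.2) else p
    if v < p.2 then (p.1, v) else p

-- the running-max update (the first component of pvF, and the max B maintains)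
def pvMax : Int → Int → Int := fun a v => if v > a then v else a

-- B's loop body
def pvG : Int × List Int → Int → Int × List Int :=
  fun p v =>
    if v > p.1 then (v, p.2.map (fun o => o - (v - p.1)) ++ [v - v])
    else (p.1, p.2 ++ [v - p.1])

-- the first component ("high") of A's (high, low) fold is the max-fold
theorem pv_fst_pvF (t : List Int) (a b : Int) :
    (t.foldl pvF (a, b)).1 = t.foldl pvMax a := by
  induction t generalizing a b with
  | nil => rfl
  | cons v t ih =>
    simp only [List.foldl_cons, pvF, pvMax]
    by_cases h1 : a < v <;> by_cases h2 : v < b <;> simp [h1, h2] <;> exact ih _ _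

-- invariant of B's loop: the accumulated output is the processed prefix
-- normalized by the running max, and the final max is the max-fold
theorem pv_inv (l : List Int) (m : Int) (pre : List Int) :
    l.foldl pvG (m, pre.map (fun u => u - m)) =
      (l.foldl pvMax m, (pre ++ l).map (fun u => u - l.foldl pvMax m)) := by
  induction l generalizing m pre with
  | nil => simp
  | cons v t ih =>
    simp only [List.foldl_cons]
    by_cases h : v > m
    · have e : pvG (m, pre.map (fun u => u - m)) v
          = (v, (pre ++ [v]).map (fun u => u - v)) := by
        simp only [pvG, if_pos h, List.map_append, List.map_map]
        congr 1
        congr 1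
        apply List.map_congr_left; intro u _; simp
      rw [e]
      have := ih v (pre ++ [v])
      simp only [List.append_assoc, List.singleton_append] at this
      rw [this]
      simp [pvMax, h]
    · have e : pvG (m, pre.map (fun u => u - m)) v
          = (m, (pre ++ [v]).map (fun u => u - m)) := by
        simp [pvG, if_neg h]
      rw [e]
      have := ih m (pre ++ [v])
      simp only [List.append_assoc, List.singleton_append] at this
      rw [this]
      simp [pvMax, h]

-- ===== VERDICT (by name: the statement is the Claim_ definition above) =====
theorem norm_fun_spec : Claim_equal_norm_fun := by
  intro x _ hpre
  obtain ⟨h, t, rfl⟩ : ∃ h t, x = h :: t := by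
    cases x with
    | nil => exact absurd rfl hpre
    | cons h t => exact ⟨h, t, rfl⟩
  unfold Spec_norm_fun
  -- B's side: unfold the fold via the invariant
  have hb : norm_fun_alt (h :: t)
      = (h :: t).map (fun u => u - t.foldl pvMax h) := by
    show ((h :: t).foldl pvG (h, ([] : List Int))).2 = _
    have := pv_inv (h :: t) h []
    simp only [List.map_nil, List.nil_append] at this
    rw [this]
    simp only [List.foldl_cons]
    rw [show pvMax h h = h by simp [pvMax]]
  -- A's side
  have e1 : PySem.List.pyGet? (h :: t) (0:Int) = some h := by
    simp [PySem.List.pyGet?, PySem.List.pyIdx?]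
  have e2 : norm_fun (h :: t)
      = (PySem.List.pyRange 0 (((h :: t).length : Int)) 1).foldl
          (fun acc n => acc ++
            [(PySem.List.pyGetD (h :: t) n 0
                - ((PySem.List.pyRange 0 (((h :: t).length : Int)) 1).foldl
                    (fun p n => pvF p (PySem.List.pyGetD (h :: t) n 0)) (h, h)).2)
              - (((PySem.List.pyRange 0 (((h :: t).length : Int)) 1).foldl
                    (fun p n => pvF p (PySem.List.pyGetD (h :: t) n 0)) (h, h)).1
                 - ((PySem.List.pyRange 0 (((h :: t).length : Int)) 1).foldl
                    (fun p n => pvF p (PySem.List.pyGetD (h :: t) n 0)) (h, h)).2)]) [] := by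
    unfold norm_fun; rw [e1]; rfl
  rw [e2, PySem.List.foldl_pyRange_zero_pyGetD' (h :: t) 0 pvF (h, h)]
  rw [show (h :: t).foldl pvF (h, h) = t.foldl pvF (h, h) by
        simp only [List.foldl_cons, pvF]; norm_num]
  rw [hb]
  rw [← pv_fst_pvF t h h]
  generalize (t.foldl pvF (h, h)) = q
  rw [PySem.List.foldl_pyRange_zero_pyGetD' (h :: t) 0
        (fun acc v => acc ++ [(v - q.2) - (q.1 - q.2)]) []]
  rw [PySem.List.foldl_append_singleton_eq_map]
  simp only [List.nil_append]
  congr 1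
  funext v
  ring
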